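-- pv_equiv track=rewrite | github.com/LeChummpy/homework | algorithmus/algorrithmus_übung.py | Ist2MalEnthalten
-- ===== SOURCE A (Python) =====
-- def Ist2MalEnthalten(Eingabe1, Eingabe2):
--     liste = Eingabe1
--     x = Eingabe2
--
--     Anzahlx = 0
--     for i in range(len(liste)):
--         if (liste[i]==x):
--             Anzahlx=Anzahlx+1
--
--     if Anzahlx>=2:
--         return True
--     else:
--         return False
-- ===== SOURCE B (Python) =====
-- def Ist2MalEnthalten(Eingabe1, Eingabe2):
--     liste = Eingabe1
--     x = Eingabe2
--     if x in liste:
--         i = liste.index(x)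
--         return x in liste[i+1:]
--     return False
-- ===== Notes on version B (the rewrite author's own statement) =====
-- stated objective: alternative
-- what changed: Replaces A's full-count-then-threshold loop by a find-first-occurrence-then-rescan-tail decomposition ('x in liste' / liste.index / 'x in liste[i+1:]') with early exit.
import Mathlib
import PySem

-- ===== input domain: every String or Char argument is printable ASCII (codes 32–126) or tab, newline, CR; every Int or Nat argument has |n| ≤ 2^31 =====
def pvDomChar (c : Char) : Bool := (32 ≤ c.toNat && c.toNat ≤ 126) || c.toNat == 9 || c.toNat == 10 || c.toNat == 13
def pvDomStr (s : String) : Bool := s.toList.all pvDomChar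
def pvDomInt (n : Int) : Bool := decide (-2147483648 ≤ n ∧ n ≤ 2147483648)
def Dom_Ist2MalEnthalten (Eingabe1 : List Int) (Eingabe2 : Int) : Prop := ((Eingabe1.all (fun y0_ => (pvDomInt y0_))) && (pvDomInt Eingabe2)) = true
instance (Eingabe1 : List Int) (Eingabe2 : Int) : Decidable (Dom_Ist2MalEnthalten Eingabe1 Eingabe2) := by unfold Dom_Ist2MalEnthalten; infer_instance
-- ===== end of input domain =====

-- B replaces A's count-all-then-threshold loop by a find-first-occurrence-then-rescan-tail decomposition (alternative, same cost).


-- ===== PORT A =====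
def Ist2MalEnthalten (Eingabe1 : List Int) (Eingabe2 : Int) : Bool :=
  let liste := Eingabe1
  let x := Eingabe2
  let Anzahlx : Int :=
    (PySem.List.pyRange 0 (PySem.List.len liste) 1).foldl
      (fun Anzahlx i => if PySem.List.pyGetD liste i 0 == x then Anzahlx + 1 else Anzahlx) 0
  if Anzahlx ≥ 2 then true else false

-- ===== PORT B =====
def Ist2MalEnthalten_alt (Eingabe1 : List Int) (Eingabe2 : Int) : Bool :=
  let liste := Eingabe1
  let x := Eingabe2
  if liste.contains x then
    match PySem.List.index? liste x with
    | some i => (PySem.List.slice liste (some ((i : Int) + 1)) none).contains x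
    | none => false
  else false

-- ===== PRECONDITION & SPEC =====
def Spec_Ist2MalEnthalten (Eingabe1 : List Int) (Eingabe2 : Int) (out : Bool) : Prop := out = Ist2MalEnthalten_alt Eingabe1 Eingabe2
instance (Eingabe1 : List Int) (Eingabe2 : Int) (out : Bool) : Decidable (Spec_Ist2MalEnthalten Eingabe1 Eingabe2 out) := by unfold Spec_Ist2MalEnthalten; infer_instance

-- ===== CLAIM (what is proved, stated in full; the proofs are below) =====
def Claim_equal_Ist2MalEnthalten : Prop := ∀ (Eingabe1 : List Int) (Eingabe2 : Int), Dom_Ist2MalEnthalten Eingabe1 Eingabe2 → Spec_Ist2MalEnthalten Eingabe1 Eingabe2 (Ist2MalEnthalten Eingabe1 Eingabe2)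

-- ===== LEMMAS AND PROOFS =====

-- A's loop computes the number of occurrences of x in the list.
theorem istA_eq_count (l : List Int) (x : Int) :
    Ist2MalEnthalten l x = decide (2 ≤ l.count x) := by
  unfold Ist2MalEnthalten
  dsimp only
  rw [PySem.List.foldl_pyRange_zero_pyGetD l 0 (fun Anzahlx y => if (y == x) = true then Anzahlx + 1 else Anzahlx) 0,
      PySem.List.foldl_beq_add_one]
  simp [ge_iff_le]

-- ===== VERDICT (by name: the statement is the Claim_ definition above) =====
theorem Ist2MalEnthalten_spec : Claim_equal_Ist2MalEnthalten := by
  intro l x _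
  unfold Spec_Ist2MalEnthalten
  rw [istA_eq_count]
  unfold Ist2MalEnthalten_alt
  simp only [List.contains_eq_mem]
  by_cases hx : x ∈ l
  · have hsome : (PySem.List.index? l x).isSome = true :=
      (PySem.List.index?_isSome_iff l x).mpr hx
    obtain ⟨k, hk⟩ := Option.isSome_iff_exists.mp hsome
    obtain ⟨pre, suf, rfl, hlen, hnot⟩ := (PySem.List.index?_eq_some_iff _ _ _).mp hk
    rw [hk]
    dsimp only
    have hcast : ((k : Int) + 1) = ((k + 1 : Nat) : Int) := by push_cast; ring
    rw [hcast, PySem.List.slice_from_natCast]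
    have hdrop : (pre ++ x :: suf).drop (k + 1) = suf := by
      subst hlen
      simp [List.drop_append]
    rw [hdrop]
    have hpre : pre.count x = 0 := List.count_eq_zero.mpr hnot
    have hcount : (pre ++ x :: suf).count x = suf.count x + 1 := by
      simp [List.count_append, hpre]
    rw [hcount]
    simp only [decide_eq_true_eq, hx, if_pos]
    by_cases hs : x ∈ suf
    · have h1 : 1 ≤ suf.count x := List.one_le_count_iff.mpr hs
      simp [hs]
    · have h0 : suf.count x = 0 := List.count_eq_zero.mpr hs
      simp [hs, h0]
  · have h0 : l.count x = 0 := List.count_eq_zero.mpr hx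
    simp [hx, h0]
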